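-- pv_equiv track=rewrite | github.com/slottwo/rpg-dpc | calculator/old.py | sums_counter
-- ===== SOURCE A (Python) =====
-- def sums_counter(amount: int, faces: int):
--     result_min = amount  # * 1 (minor face); The minimum scrollable result
--     result_max = amount * faces  # The maximum scrollable result
--     results = dict()  # The count will be allocated in a dictionary listing how many times each hit occurs
--     even = amount % 2 != 0 and faces % 2 == 0  # No, no is wrong! This "even" meas if the length counts is even,
--     # and it will be important in the line 18
--     result_mid = (result_max + result_min) // 2  # Similar to the Pascal sequence, it is mirrored in its midst
--
--     if amount == 1:  # In the case, we have a equiprobable sample space, so all the results occur once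
--         for result in range(result_min, result_max+1):
--             results[result] = 1
--     else:  # If you tab the possible results, you will see that a "pyramidal" pattern to the values with a arithmetic
--         # ratio of the 1
--         for result in range(result_min, result_max+1):
--             if result == result_min:
--                 results[result] = 1
--             elif result <= result_mid:
--                 results[result] = results[result - 1] + 1
--             elif result == result_mid + 1 and even:
--                 results[result] = results[result - 1]
--             else:
--                 results[result] = results[result-1] - 1
--     return results
-- ===== SOURCE B (Python) =====
-- def sums_counter(amount: int, faces: int):
--     lo = amount
--     hi = amount * faces
--     if amount == 1:
--         return {r: 1 for r in range(lo, hi + 1)}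
--     return {r: min(r - lo, hi - r) + 1 for r in range(lo, hi + 1)}
-- ===== Notes on version B (the rewrite author's own statement) =====
-- stated objective: simpler
-- what changed: Replaces the chained previous-value recurrence with its mid/even flat-top special cases by a direct closed form per key: results[r] = min(r - lo, hi - r) + 1, computed independently for each r.
import Mathlib
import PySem

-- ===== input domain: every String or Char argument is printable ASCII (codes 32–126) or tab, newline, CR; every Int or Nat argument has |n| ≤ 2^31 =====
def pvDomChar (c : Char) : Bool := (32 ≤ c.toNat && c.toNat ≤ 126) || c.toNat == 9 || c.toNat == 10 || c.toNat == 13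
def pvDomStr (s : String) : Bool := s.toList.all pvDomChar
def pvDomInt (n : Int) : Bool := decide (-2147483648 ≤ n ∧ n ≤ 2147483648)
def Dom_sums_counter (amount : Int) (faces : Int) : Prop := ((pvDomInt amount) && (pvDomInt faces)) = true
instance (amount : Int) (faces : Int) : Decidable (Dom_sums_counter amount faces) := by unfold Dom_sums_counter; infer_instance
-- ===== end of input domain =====

-- B replaces A's chained previous-value recurrence (with its mid/even flat-top cases)
-- by an independent closed form per key, min(r-lo, hi-r)+1: simpler, same cost.

-- ===== PORT A =====
-- `results[result - 1]` is ported as getD _ 0: the key result-1 was inserted on the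
-- previous iteration (the loop starts at result_min), so Python's lookup never raises
-- and the default 0 is never used.
def sums_counter (amount : Int) (faces : Int) : List (Int × Int) :=
  let result_min := amount
  let result_max := amount * faces
  let even := PySem.Int.mod amount 2 != 0 && PySem.Int.mod faces 2 == 0
  let result_mid := PySem.Int.floordiv (result_max + result_min) 2
  let results : PySem.Dict Int Int :=
    if amount == 1 then
      (PySem.List.pyRange result_min (result_max + 1) 1).foldl
        (fun d result => d.insert result 1) PySem.Dict.empty
    else
      (PySem.List.pyRange result_min (result_max + 1) 1).foldl
        (fun d result =>
          if result == result_min then d.insert result 1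
          else if result ≤ result_mid then d.insert result (d.getD (result - 1) 0 + 1)
          else if result == result_mid + 1 && even then d.insert result (d.getD (result - 1) 0)
          else d.insert result (d.getD (result - 1) 0 - 1)) PySem.Dict.empty
  results.items

-- ===== PORT B =====
def sums_counter_alt (amount : Int) (faces : Int) : List (Int × Int) :=
  let lo := amount
  let hi := amount * faces
  if amount == 1 then
    ((PySem.List.pyRange lo (hi + 1) 1).foldl
      (fun d r => d.insert r 1) (PySem.Dict.empty : PySem.Dict Int Int)).items
  else
    ((PySem.List.pyRange lo (hi + 1) 1).foldl
      (fun d r => d.insert r (min (r - lo) (hi - r) + 1)) (PySem.Dict.empty : PySem.Dict Int Int)).items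

-- ===== PRECONDITION & SPEC =====
def Spec_sums_counter (amount : Int) (faces : Int) (out : List (Int × Int)) : Prop := out = sums_counter_alt amount faces
instance (amount : Int) (faces : Int) (out : List (Int × Int)) : Decidable (Spec_sums_counter amount faces out) := by unfold Spec_sums_counter; infer_instance

-- ===== CLAIM (what is proved, stated in full; the proofs are below) =====
def Claim_equal_sums_counter : Prop := ∀ (amount : Int) (faces : Int), Dom_sums_counter amount faces → Spec_sums_counter amount faces (sums_counter amount faces)

-- ===== LEMMAS AND PROOFS =====

-- A's loop body, written as a single insert of a branch-selected value.
def pvStepA (rmin rmid : Int) (even : Bool) (d : PySem.Dict Int Int) (r : Int) : PySem.Dict Int Int :=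
  if r == rmin then d.insert r 1
  else if r ≤ rmid then d.insert r (d.getD (r - 1) 0 + 1)
  else if r == rmid + 1 && even then d.insert r (d.getD (r - 1) 0)
  else d.insert r (d.getD (r - 1) 0 - 1)

def pvValA (rmin rmid : Int) (even : Bool) (d : PySem.Dict Int Int) (r : Int) : Int :=
  if r == rmin then 1
  else if r ≤ rmid then d.getD (r - 1) 0 + 1
  else if r == rmid + 1 && even then d.getD (r - 1) 0
  else d.getD (r - 1) 0 - 1

lemma pvStepA_eq_insert (rmin rmid : Int) (even : Bool) (d : PySem.Dict Int Int) (r : Int) :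
    pvStepA rmin rmid even d r = d.insert r (pvValA rmin rmid even d r) := by
  unfold pvStepA pvValA; split_ifs <;> rfl

-- the closed form B assigns
def pvF (lo hi r : Int) : Int := min (r - lo) (hi - r) + 1

-- the "even" flag is true iff lo + hi is odd
lemma pvEvenIff (amount faces : Int) :
    ((PySem.Int.mod amount 2 != 0 && PySem.Int.mod faces 2 == 0) = true)
      ↔ Odd (amount + amount * faces) := by
  have h : amount + amount * faces = amount * (1 + faces) := by ring
  rw [h, Int.odd_mul]
  simp [Int.odd_iff, bne_iff_ne]
  omega

-- A's accumulated dict over pyRange rmin k equals B's closed-form table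
lemma pvLoopA (amount faces : Int) :
    ∀ (k : Int), amount ≤ k → k ≤ amount * faces + 1 →
      ((PySem.List.pyRange amount k 1).foldl
          (pvStepA amount (PySem.Int.floordiv (amount * faces + amount) 2)
            (PySem.Int.mod amount 2 != 0 && PySem.Int.mod faces 2 == 0))
          PySem.Dict.empty).items
        = (PySem.List.pyRange amount k 1).map
            (fun r => (r, pvF amount (amount * faces) r)) := by
  set rmax := amount * faces with hrmax
  set rmid := PySem.Int.floordiv (rmax + amount) 2 with hrmid
  set even := (PySem.Int.mod amount 2 != 0 && PySem.Int.mod faces 2 == 0) with heven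
  have hmid : rmid * 2 ≤ rmax + amount ∧ rmax + amount < (rmid + 1) * 2 :=
    (PySem.Int.floordiv_eq_iff_of_pos (by norm_num)).mp rfl
  have hpar : even = true ↔ Odd (amount + rmax) := by rw [heven, hrmax]; exact pvEvenIff amount faces
  intro k hk
  induction k, hk using Int.le_induction with
  | base =>
    intro _
    rw [PySem.List.pyRange_one_eq_nil (le_refl amount)]
    rfl
  | succ k hk ih =>
    intro hk1
    have hkr : k ≤ rmax := by omega
    have ihh := ih (by omega)
    rw [PySem.List.pyRange_one_succ_right hk, List.foldl_append, List.map_append]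
    simp only [List.foldl_cons, List.foldl_nil]
    rw [pvStepA_eq_insert]
    set d := (PySem.List.pyRange amount k 1).foldl
        (pvStepA amount rmid even) PySem.Dict.empty with hd
    have hkeys : d.keys = PySem.List.pyRange amount k 1 := by
      simp only [PySem.Dict.keys, ihh, List.map_map]
      simp [Function.comp_def]
    have hnc : d.contains k = false := by
      rw [PySem.Dict.contains_eq_decide_mem_keys, hkeys]
      simp [PySem.List.mem_pyRange_one]
    rw [PySem.Dict.items_insert_of_not_contains d _ hnc, ihh]
    have hval : pvValA amount rmid even d k = pvF amount rmax k := by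
      rcases eq_or_lt_of_le hk with heq | hlt
      · -- k = amount : first branch
        subst heq
        simp only [pvValA, beq_self_eq_true, if_true, pvF]
        omega
      · -- amount < k : previous value is in the table
        have hprev : d.getD (k - 1) 0 = pvF amount rmax (k - 1) := by
          have hmem : (k - 1, pvF amount rmax (k - 1)) ∈ d.items := by
            rw [ihh]
            exact List.mem_map_of_mem (by rw [PySem.List.mem_pyRange_one]; omega)
          have hnd : d.keys.Nodup := by rw [hkeys]; exact PySem.List.nodup_pyRange_one _ _
          exact PySem.Dict.getD_of_mem_items d hmem hnd 0
        have hne : (k == amount) = false := by simp; omega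
        simp only [pvValA, hprev, hne, Bool.false_eq_true, if_false]
        by_cases hle : k ≤ rmid
        · rw [if_pos hle]
          simp only [pvF]; omega
        · rw [if_neg hle]
          by_cases hmid1 : k = rmid + 1 ∧ even = true
          · have hcond : (k == rmid + 1 && even) = true := by simp [hmid1.1, hmid1.2]
            rw [hcond, if_pos rfl]
            obtain ⟨m, hm⟩ := hpar.mp hmid1.2
            simp only [pvF]; omega
          · have hcond : (k == rmid + 1 && even) = false := by
              rcases Bool.eq_false_or_eq_true even with he | he
              · simp only [he, Bool.and_true, beq_eq_false_iff_ne, ne_eq]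
                exact fun hc => hmid1 ⟨hc, he⟩
              · simp [he]
            rw [hcond]
            simp only [Bool.false_eq_true, if_false, pvF]
            rcases eq_or_lt_of_le (show rmid + 1 ≤ k by omega) with h1 | h1
            · have hevf : even = false := by
                rcases Bool.eq_false_or_eq_true even with he | he
                · exact absurd ⟨h1.symm, he⟩ hmid1
                · exact he
              have hnotodd : ¬ Odd (amount + rmax) := by
                intro ho; rw [← hpar] at ho; simp [hevf] at ho
              rw [Int.not_odd_iff_even] at hnotodd
              obtain ⟨m, hm⟩ := hnotodd
              omega
            · omega
    rw [hval]
    simp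

-- B's fold over fresh increasing keys is the map table
lemma pvLoopB (lo hi : Int) (f : Int → Int) :
    ((PySem.List.pyRange lo (hi + 1) 1).foldl
        (fun d r => d.insert r (f r)) (PySem.Dict.empty : PySem.Dict Int Int)).items
      = (PySem.List.pyRange lo (hi + 1) 1).map (fun r => (r, f r)) := by
  have := PySem.Dict.items_foldl_insert_fresh (PySem.List.pyRange lo (hi + 1) 1)
      (fun r => r) f (PySem.Dict.empty : PySem.Dict Int Int)
      (fun a _ => by simp) (by simpa using PySem.List.nodup_pyRange_one lo (hi + 1))
  simpa using this

-- ===== VERDICT (by name: the statement is the Claim_ definition above) =====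
theorem sums_counter_spec : Claim_equal_sums_counter := by
  intro amount faces _
  unfold Spec_sums_counter sums_counter sums_counter_alt
  by_cases h1 : amount = 1
  · simp only [h1]
    rfl
  · have hne : (amount == 1) = false := by simp [h1]
    simp only [hne, Bool.false_eq_true, if_false]
    rw [pvLoopB amount (amount * faces) (fun r => min (r - amount) (amount * faces - r) + 1)]
    by_cases hr : amount ≤ amount * faces + 1
    · have := pvLoopA amount faces (amount * faces + 1) hr (le_refl _)
      simp only [pvF] at this
      exact this
    · rw [PySem.List.pyRange_one_eq_nil (by omega)]
      rfl
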